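-- pv_equiv track=rewrite | github.com/Arsen1302/Code-copy-detector | TestData/solutions/problem_497_2_1.py | solution_497_2_1
-- ===== SOURCE A (Python) =====
-- def solution_497_2_1(s: str, words) -> int:
--
--     def solution_497_2_2 (s):
--         wordTable = []
--         repeatCounter = 1
--         solution_497_2_2 = ""
--         for i in range(len(s)):
--             if i == 0:
--                 continue
--             if s[i] == s[i-1]:
--                 repeatCounter += 1
--             else:
--                 solution_497_2_2 += s[i-1]
--                 wordTable.append(repeatCounter)
--                 repeatCounter = 1
--
--         else:
--             solution_497_2_2 += s[len(s)-1]
--             wordTable.append(repeatCounter)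
--
--         return solution_497_2_2, wordTable
--
--
--     matchCounter = 0
--     sampleCondenseWord, sampleWordTable = solution_497_2_2(s)
--     for word in words:
--         testCondenseWord, testWordTable = solution_497_2_2(word)
--         if sampleCondenseWord == testCondenseWord:
--             for i in range(len(sampleCondenseWord)):
--                 if sampleWordTable[i] >= 3 and sampleWordTable[i] < testWordTable[i]:
--                     break
--                 if sampleWordTable[i] < 3 and sampleWordTable[i] != testWordTable[i]:
--                     break
--             else:
--                 matchCounter += 1
--
--     return matchCounter
-- ===== SOURCE B (Python) =====
-- def solution_497_2_1(s: str, words) -> int: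
--     # Two-pointer scan: compare each word against the sample run by run in place,
--     # without materializing any run-length encoding.
--     def matches(w):
--         x, y = s, w
--         while x and y:
--             if x[0] != y[0]:
--                 return False
--             c = x[0]
--             a = 1
--             while a < len(x) and x[a] == c:
--                 a += 1
--             b = 1
--             while b < len(y) and y[b] == c:
--                 b += 1
--             if (a >= 3 and b > a) or (a < 3 and b != a):
--                 return False
--             x, y = x[a:], y[b:]
--         return not x and not y
--
--     return len([w for w in words if matches(w)])
-- ===== Notes on version B (the rewrite author's own statement) =====
-- stated objective: alternative
-- what changed: Instead of A's run-length encoding of sample and word into a condensed string plus parallel count list followed by an indexed break/else comparison loop, B never builds any encoding: a two-pointer scan walks sample and word simultaneously, measuring one run of each in place and checking the >=3/exact rule run by run.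
import Mathlib
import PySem

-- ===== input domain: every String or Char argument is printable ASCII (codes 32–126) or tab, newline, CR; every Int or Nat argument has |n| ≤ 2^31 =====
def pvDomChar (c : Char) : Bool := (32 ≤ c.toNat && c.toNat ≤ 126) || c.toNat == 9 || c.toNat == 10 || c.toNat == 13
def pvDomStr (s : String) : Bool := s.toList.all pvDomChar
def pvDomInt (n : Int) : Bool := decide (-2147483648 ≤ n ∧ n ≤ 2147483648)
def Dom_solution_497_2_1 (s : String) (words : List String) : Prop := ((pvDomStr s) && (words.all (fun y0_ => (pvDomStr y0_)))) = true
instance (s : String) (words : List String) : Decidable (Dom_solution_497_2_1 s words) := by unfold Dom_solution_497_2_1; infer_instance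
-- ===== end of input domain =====

-- B replaces A's run-length-encode-then-compare (condensed string + parallel count list)
-- by a two-pointer scan that walks sample and word simultaneously, measuring and checking
-- one run at a time with no intermediate encoding.  Objective: alternative.

-- ===== PORT A =====
-- inner helper solution_497_2_2's for-loop body (cs fixed, state = (condensed, wordTable, repeatCounter))
def pvStepA (cs : List Char) (st : List Char × List Int × Int) (i : Int) :
    List Char × List Int × Int :=
  if i = 0 then st
  else if PySem.List.pyGetD cs i ' ' = PySem.List.pyGetD cs (i - 1) ' ' then
    (st.1, st.2.1, st.2.2 + 1)
  else
    (st.1 ++ [PySem.List.pyGetD cs (i - 1) ' '], st.2.1 ++ [st.2.2], 1)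

-- port of solution_497_2_2 (condensed string kept as List Char); on the empty string the
-- Python raises IndexError (excluded by Pre_), here pyGetD's default is returned
def pvEncA (cs : List Char) : List Char × List Int :=
  let st := (PySem.List.pyRange 0 (cs.length : Int) 1).foldl (pvStepA cs) ([], [], 1)
  (st.1 ++ [PySem.List.pyGetD cs ((cs.length : Int) - 1) ' '], st.2.1 ++ [st.2.2])

-- the inner 'for i in range(len(sampleCondenseWord)): … break … else:' loop; returns
-- true iff the else-branch (no break) is reached
def pvInnerA (st tt : List Int) : List Int → Bool
  | [] => true
  | i :: rest =>
    if PySem.List.pyGetD st i 0 ≥ 3 ∧ PySem.List.pyGetD st i 0 < PySem.List.pyGetD tt i 0 then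
      false
    else if PySem.List.pyGetD st i 0 < 3 ∧ PySem.List.pyGetD st i 0 ≠ PySem.List.pyGetD tt i 0 then
      false
    else pvInnerA st tt rest

def solution_497_2_1 (s : String) (words : List String) : Int :=
  let sp := pvEncA s.toList
  words.foldl
    (fun acc word =>
      let tp := pvEncA word.toList
      if sp.1 = tp.1 then
        if pvInnerA sp.2 tp.2 (PySem.List.pyRange 0 ((sp.1.length : Int)) 1) then acc + 1
        else acc
      else acc)
    0

-- ===== PORT B =====
-- 'while a < len(x) and x[a] == c: a += 1' starting at a = 1: length of the run of c at
-- the head of the tail (x = c :: tail, result = a - 1)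
def pvRunLen (c : Char) : List Char → Nat
  | [] => 0
  | d :: t => if d = c then pvRunLen c t + 1 else 0

-- the outer 'while x and y' loop of B's matches, state = (x, y)
def pvMatches (x y : List Char) : Bool :=
  match x, y with
  | [], [] => true
  | [], _ :: _ => false
  | _ :: _, [] => false
  | c :: xs, d :: ys =>
    if c ≠ d then false
    else
      let a : Nat := 1 + pvRunLen c xs
      let b : Nat := 1 + pvRunLen c ys
      if (3 ≤ a ∧ a < b) ∨ (a < 3 ∧ b ≠ a) then false
      else pvMatches (List.drop a (c :: xs)) (List.drop b (d :: ys))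
termination_by x.length
decreasing_by
  simp only [List.length_drop, List.length_cons]
  omega

def solution_497_2_1_alt (s : String) (words : List String) : Int :=
  ((words.filter (fun w => pvMatches s.toList w.toList)).length : Int)

-- ===== PRECONDITION & SPEC =====
-- Pre_ excludes exactly the inputs where A raises IndexError: an empty sample string or an
-- empty word (solution_497_2_2 evaluates s[len(s)-1] on the empty string).
def Pre_solution_497_2_1 (s : String) (words : List String) : Prop :=
  s ≠ "" ∧ ∀ w ∈ words, w ≠ ""
instance (s : String) (words : List String) : Decidable (Pre_solution_497_2_1 s words) := by
  unfold Pre_solution_497_2_1; infer_instance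

def pvWitness_solution_497_2_1 : String × List String := ("aab", ["ab", "aab", "aaaab"])

def Spec_solution_497_2_1 (s : String) (words : List String) (out : Int) : Prop :=
  out = solution_497_2_1_alt s words
instance (s : String) (words : List String) (out : Int) : Decidable (Spec_solution_497_2_1 s words out) := by
  unfold Spec_solution_497_2_1; infer_instance

-- ===== CLAIM (what is proved, stated in full; the proofs are below) =====
def Claim_equal_solution_497_2_1 : Prop := ∀ (s : String) (words : List String), Dom_solution_497_2_1 s words → Pre_solution_497_2_1 s words → Spec_solution_497_2_1 s words (solution_497_2_1 s words)

-- ===== LEMMAS AND PROOFS =====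

def pvRule (a b : Int) : Bool := if a ≥ 3 then decide (b ≤ a) else decide (b = a)

-- spec-level predicate: run lists have the same characters and every pair of counts
-- satisfies the rule
def pvOk (S T : List (Char × Int)) : Bool :=
  decide (S.map Prod.fst = T.map Prod.fst) && (S.zip T).all (fun x => pvRule x.1.2 x.2.2)

-- run-length encoding of p^k ++ l (k = count of the current run of p)
def pvRuns (p : Char) (k : Int) : List Char → List (Char × Int)
  | [] => [(p, k)]
  | c :: rest => if c = p then pvRuns p (k + 1) rest else (p, k) :: pvRuns c 1 rest

def pvRunsOf : List Char → List (Char × Int)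
  | [] => []
  | c :: l => pvRuns c 1 l

theorem pvRuns_ne_nil (p : Char) (k : Int) (l : List Char) : pvRuns p k l ≠ [] := by
  induction l generalizing p k with
  | nil => simp [pvRuns]
  | cons c rest ih =>
    unfold pvRuns
    by_cases h : c = p
    · simpa [h] using ih p (k + 1)
    · simp [h]

theorem pvRunLen_le (c : Char) (l : List Char) : pvRunLen c l ≤ l.length := by
  induction l with
  | nil => simp [pvRunLen]
  | cons d t ih =>
    unfold pvRunLen
    by_cases h : d = c <;> simp [h] <;> omega

theorem pvRuns_decomp (c : Char) (l : List Char) : ∀ k : Int,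
    pvRuns c k l = (c, k + (pvRunLen c l : Int)) :: pvRunsOf (l.drop (pvRunLen c l)) := by
  induction l with
  | nil => intro k; simp [pvRuns, pvRunLen, pvRunsOf]
  | cons d t ih =>
    intro k
    unfold pvRuns pvRunLen
    by_cases h : d = c
    · subst h
      rw [if_pos rfl, if_pos rfl, ih (k + 1)]
      have : (k + 1) + (pvRunLen d t : Int) = k + ((pvRunLen d t + 1 : Nat) : Int) := by
        push_cast; ring
      rw [this]
      simp
    · rw [if_neg h, if_neg h]
      simp [pvRunsOf]

-- pvOk on two decomposed run lists splits into head rule and tail pvOk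
theorem pvOk_cons (c : Char) (p q : Int) (S T : List (Char × Int)) :
    pvOk ((c, p) :: S) ((c, q) :: T) = (pvRule p q && pvOk S T) := by
  unfold pvOk
  simp only [List.map_cons, List.zip_cons_cons, List.all_cons]
  by_cases h : S.map Prod.fst = T.map Prod.fst
  · simp [h, Bool.and_comm, Bool.and_assoc, Bool.and_left_comm]
  · simp [h]

-- B's two-pointer loop computes exactly pvOk of the two run encodings
theorem pvMatches_eq (n : Nat) : ∀ (x y : List Char), x.length ≤ n →
    pvMatches x y = pvOk (pvRunsOf x) (pvRunsOf y) := by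
  induction n with
  | zero =>
    intro x y hx
    have : x = [] := by cases x <;> simp_all
    subst this
    cases y with
    | nil => simp [pvMatches, pvRunsOf, pvOk]
    | cons d ys =>
      rw [pvMatches]
      have hne := pvRuns_ne_nil d 1 ys
      unfold pvRunsOf pvOk
      cases h : pvRuns d 1 ys with
      | nil => exact absurd h hne
      | cons a t => simp [h]
  | succ n ih =>
    intro x y hx
    cases x with
    | nil =>
      cases y with
      | nil => simp [pvMatches, pvRunsOf, pvOk]
      | cons d ys =>
        rw [pvMatches]
        have hne := pvRuns_ne_nil d 1 ys
        unfold pvRunsOf pvOk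
        cases h : pvRuns d 1 ys with
        | nil => exact absurd h hne
        | cons a t => simp [h]
    | cons c xs =>
      cases y with
      | nil =>
        rw [pvMatches]
        have hne := pvRuns_ne_nil c 1 xs
        unfold pvRunsOf pvOk
        cases h : pvRuns c 1 xs with
        | nil => exact absurd h hne
        | cons a t => simp [h]
      | cons d ys =>
        rw [pvMatches]
        by_cases hcd : c = d
        · subst hcd
          rw [if_neg (by simp)]
          set a := pvRunLen c xs with ha
          set b := pvRunLen c ys with hb
          have hdx : pvRunsOf (c :: xs) = (c, 1 + (a : Int)) :: pvRunsOf (xs.drop a) := by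
            show pvRuns c 1 xs = _; rw [pvRuns_decomp]
          have hdy : pvRunsOf (c :: ys) = (c, 1 + (b : Int)) :: pvRunsOf (ys.drop b) := by
            show pvRuns c 1 ys = _; rw [pvRuns_decomp]
          rw [hdx, hdy, pvOk_cons]
          have hdrx : List.drop (1 + a) (c :: xs) = xs.drop a := by
            simp [List.drop_succ_cons, Nat.add_comm 1 a]
          have hdry : List.drop (1 + b) (c :: ys) = ys.drop b := by
            simp [List.drop_succ_cons, Nat.add_comm 1 b]
          have hlen : (xs.drop a).length ≤ n := by
            simp only [List.length_drop]
            have := pvRunLen_le c xs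
            simp only [List.length_cons] at hx
            omega
          by_cases hfail : (3 ≤ 1 + a ∧ 1 + a < 1 + b) ∨ (1 + a < 3 ∧ 1 + b ≠ 1 + a)
          · rw [if_pos hfail]
            have hr : pvRule (1 + (a : Int)) (1 + (b : Int)) = false := by
              unfold pvRule
              rcases hfail with ⟨h1, h2⟩ | ⟨h1, h2⟩
              · rw [if_pos (by push_cast; omega)]; simp; push_cast; omega
              · rw [if_neg (by push_cast; omega)]; simp; push_cast; omega
            rw [hr]; simp
          · rw [if_neg hfail]
            have hr : pvRule (1 + (a : Int)) (1 + (b : Int)) = true := by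
              unfold pvRule
              by_cases h3 : (3 : Int) ≤ 1 + (a : Int)
              · rw [if_pos (by omega)]; simp
                have : ¬ (3 ≤ 1 + a ∧ 1 + a < 1 + b) := fun h => hfail (Or.inl h)
                push_cast at h3 ⊢; omega
              · rw [if_neg (by omega)]; simp
                have : ¬ (1 + a < 3 ∧ 1 + b ≠ 1 + a) := fun h => hfail (Or.inr h)
                push_cast at h3 ⊢; omega
            rw [hr, hdrx, hdry, ih _ _ hlen]
            simp
        · rw [if_pos (by simpa using hcd)]
          have hdx : pvRunsOf (c :: xs)
              = (c, 1 + (pvRunLen c xs : Int)) :: pvRunsOf (xs.drop (pvRunLen c xs)) := by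
            show pvRuns c 1 xs = _; rw [pvRuns_decomp]
          have hdy : pvRunsOf (d :: ys)
              = (d, 1 + (pvRunLen d ys : Int)) :: pvRunsOf (ys.drop (pvRunLen d ys)) := by
            show pvRuns d 1 ys = _; rw [pvRuns_decomp]
          rw [hdx, hdy]
          simp [pvOk, hcd]

-- ===== A-side lemmas: A's encoding equals the pvRuns characterization =====

theorem pvEncA_go (b : List Char) : ∀ (cs : List Char) (k : Nat) (p : Char)
    (cond : List Char) (wt : List Int) (rc : Int), cs.drop k = p :: b →
    (let st := (PySem.List.pyRange ((k : Int) + 1) (cs.length : Int) 1).foldl (pvStepA cs) (cond, wt, rc)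
     (st.1 ++ [PySem.List.pyGetD cs ((cs.length : Int) - 1) ' '], st.2.1 ++ [st.2.2]))
    = (cond ++ (pvRuns p rc b).map Prod.fst, wt ++ (pvRuns p rc b).map Prod.snd) := by
  induction b with
  | nil =>
    intro cs k p cond wt rc hdrop
    have hk : k < cs.length := by
      have := congrArg List.length hdrop; simp at this; omega
    have hlen : cs.length = k + 1 := by
      have := congrArg List.length hdrop; simp at this; omega
    have hget : cs[k] = p := by
      have h0 : cs[k]? = some p := by
        have h : (cs.drop k)[0]? = cs[k+0]? := List.getElem?_drop
        rw [hdrop] at h; simpa using h.symm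
      simpa [List.getElem?_eq_getElem hk] using h0
    have hrange : PySem.List.pyRange ((k : Int) + 1) (cs.length : Int) 1 = [] := by
      apply PySem.List.pyRange_one_eq_nil; omega
    simp only [hrange, List.foldl_nil, pvRuns, List.map_cons, List.map_nil]
    have hidx : ((cs.length : Int) - 1) = ((k : Nat) : Int) := by omega
    rw [hidx, PySem.List.pyGetD_natCast]
    simp [List.getD, hk, hget]
  | cons c b' ih =>
    intro cs k p cond wt rc hdrop
    have hk1 : k + 1 < cs.length := by
      have := congrArg List.length hdrop; simp at this; omega
    have hgetk : cs[k] = p := by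
      have h0 : cs[k]? = some p := by
        have h : (cs.drop k)[0]? = cs[k+0]? := List.getElem?_drop
        rw [hdrop] at h; simpa using h.symm
      simpa [List.getElem?_eq_getElem (by omega : k < cs.length)] using h0
    have hgetk1 : cs[k+1] = c := by
      have h0 : cs[k+1]? = some c := by
        have h : (cs.drop k)[1]? = cs[k+1]? := List.getElem?_drop
        rw [hdrop] at h; simpa using h.symm
      simpa [List.getElem?_eq_getElem hk1] using h0
    have hdrop' : cs.drop (k + 1) = c :: b' := by
      have h : List.drop 1 (List.drop k cs) = List.drop (k + 1) cs := List.drop_drop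
      rw [← h, hdrop]; rfl
    have hrange : PySem.List.pyRange ((k : Int) + 1) (cs.length : Int) 1
        = ((k : Int) + 1) :: PySem.List.pyRange ((k : Int) + 1 + 1) (cs.length : Int) 1 :=
      PySem.List.pyRange_one_cons (by omega)
    have hga : PySem.List.pyGetD cs ((k : Int) + 1) ' ' = c := by
      have : ((k : Int) + 1) = ((k + 1 : Nat) : Int) := by omega
      rw [this, PySem.List.pyGetD_natCast]
      simp [List.getD, hk1, hgetk1]
    have hgb : PySem.List.pyGetD cs ((k : Int) + 1 - 1) ' ' = p := by
      have : ((k : Int) + 1 - 1) = ((k : Nat) : Int) := by omega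
      rw [this, PySem.List.pyGetD_natCast]
      simp [List.getD, (by omega : k < cs.length), hgetk]
    rw [hrange]
    simp only [List.foldl_cons]
    by_cases hc : c = p
    · have hstep : pvStepA cs (cond, wt, rc) ((k : Int) + 1) = (cond, wt, rc + 1) := by
        unfold pvStepA
        rw [if_neg (by omega : ¬((k : Int) + 1 = 0)), hga, hgb, if_pos hc]
      rw [hstep]
      have hcast : ((k : Int) + 1 + 1) = (((k + 1 : Nat) : Int) + 1) := by omega
      rw [hcast]
      rw [ih cs (k + 1) p cond wt (rc + 1) (hc ▸ hdrop')]
      simp [pvRuns, hc]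
    · have hstep : pvStepA cs (cond, wt, rc) ((k : Int) + 1)
          = (cond ++ [p], wt ++ [rc], 1) := by
        unfold pvStepA
        rw [if_neg (by omega : ¬((k : Int) + 1 = 0)), hga, hgb, if_neg hc]
      rw [hstep]
      have hcast : ((k : Int) + 1 + 1) = (((k + 1 : Nat) : Int) + 1) := by omega
      rw [hcast]
      rw [ih cs (k + 1) c (cond ++ [p]) (wt ++ [rc]) 1 hdrop']
      simp [pvRuns, hc]

theorem pvEncA_eq (c : Char) (l : List Char) :
    pvEncA (c :: l) = ((pvRuns c 1 l).map Prod.fst, (pvRuns c 1 l).map Prod.snd) := by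
  have hlen : (0 : Int) < ((c :: l).length : Int) := by
    have : 0 < (c :: l).length := by simp
    exact_mod_cast this
  have hrange : PySem.List.pyRange 0 (((c :: l).length : Int)) 1
      = 0 :: PySem.List.pyRange 1 (((c :: l).length : Int)) 1 :=
    PySem.List.pyRange_one_cons hlen
  have hstep0 : pvStepA (c :: l) ([], [], 1) 0 = ([], [], 1) := by simp [pvStepA]
  have h := pvEncA_go l (c :: l) 0 c [] [] 1 (by simp)
  simp only [Nat.cast_zero, zero_add] at h
  unfold pvEncA
  rw [hrange]
  simp only [List.foldl_cons, hstep0]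
  exact h

theorem pvInnerA_go (st tt : List Int) (hlen : st.length = tt.length) :
    ∀ (d k : Nat), st.length = k + d →
    pvInnerA st tt (PySem.List.pyRange (k : Int) (st.length : Int) 1)
      = ((st.drop k).zip (tt.drop k)).all (fun x => pvRule x.1 x.2) := by
  intro d
  induction d with
  | zero =>
    intro k hk
    have hrange : PySem.List.pyRange (k : Int) (st.length : Int) 1 = [] :=
      PySem.List.pyRange_one_eq_nil (by omega)
    have h1 : st.drop k = [] := by apply List.drop_eq_nil_of_le; omega
    simp [hrange, pvInnerA, h1]
  | succ d ih =>
    intro k hk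
    have hklt : k < st.length := by omega
    have hklt' : k < tt.length := by omega
    have hrange : PySem.List.pyRange (k : Int) (st.length : Int) 1
        = (k : Int) :: PySem.List.pyRange ((k : Int) + 1) (st.length : Int) 1 :=
      PySem.List.pyRange_one_cons (by omega)
    have hga : PySem.List.pyGetD st (k : Int) 0 = st[k] := by
      rw [PySem.List.pyGetD_natCast]; simp [List.getD, hklt]
    have hgb : PySem.List.pyGetD tt (k : Int) 0 = tt[k] := by
      rw [PySem.List.pyGetD_natCast]; simp [List.getD, hklt']
    have hds : st.drop k = st[k] :: st.drop (k + 1) := List.drop_eq_getElem_cons hklt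
    have hdt : tt.drop k = tt[k] :: tt.drop (k + 1) := List.drop_eq_getElem_cons hklt'
    have hcast : ((k : Int) + 1) = ((k + 1 : Nat) : Int) := by omega
    rw [hrange]
    show (if PySem.List.pyGetD st (k:Int) 0 ≥ 3 ∧ PySem.List.pyGetD st (k:Int) 0 < PySem.List.pyGetD tt (k:Int) 0 then false
          else if PySem.List.pyGetD st (k:Int) 0 < 3 ∧ PySem.List.pyGetD st (k:Int) 0 ≠ PySem.List.pyGetD tt (k:Int) 0 then false
          else pvInnerA st tt (PySem.List.pyRange ((k:Int) + 1) (st.length : Int) 1)) = _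
    rw [hga, hgb, hds, hdt, hcast, ih (k + 1) (by omega)]
    rw [List.zip_cons_cons, List.all_cons]
    by_cases h1 : st[k] ≥ 3
    · by_cases h2 : st[k] < tt[k]
      · rw [if_pos ⟨h1, h2⟩]
        have hr : pvRule st[k] tt[k] = false := by
          unfold pvRule; rw [if_pos h1]; simp; omega
        rw [hr]; simp
      · rw [if_neg (by tauto : ¬(st[k] ≥ 3 ∧ st[k] < tt[k]))]
        rw [if_neg (by omega : ¬(st[k] < 3 ∧ st[k] ≠ tt[k]))]
        have hr : pvRule st[k] tt[k] = true := by
          unfold pvRule; rw [if_pos h1]; simp; omega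
        rw [hr]; simp
    · by_cases h2 : st[k] = tt[k]
      · rw [if_neg (by tauto : ¬(st[k] ≥ 3 ∧ st[k] < tt[k]))]
        rw [if_neg (by tauto : ¬(st[k] < 3 ∧ st[k] ≠ tt[k]))]
        have hr : pvRule st[k] tt[k] = true := by
          unfold pvRule; rw [if_neg h1]; simp; omega
        rw [hr]; simp
      · rw [if_neg (by tauto : ¬(st[k] ≥ 3 ∧ st[k] < tt[k]))]
        rw [if_pos (⟨by omega, h2⟩ : st[k] < 3 ∧ st[k] ≠ tt[k])]
        have hr : pvRule st[k] tt[k] = false := by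
          unfold pvRule; rw [if_neg h1]; simp; omega
        rw [hr]; simp

-- pointwise: A's per-word test equals pvOk of the two run lists, for a nonempty word
theorem pv_body_eq (S : List (Char × Int)) (d : Char) (m : List Char) (acc : Int) :
    (let tp := pvEncA (d :: m)
     if S.map Prod.fst = tp.1 then
       if pvInnerA (S.map Prod.snd) tp.2
           (PySem.List.pyRange 0 (((S.map Prod.fst).length : Int)) 1) then acc + 1
       else acc
     else acc)
    = (if pvOk S (pvRuns d 1 m) then acc + 1 else acc) := by
  rw [pvEncA_eq]
  set T := pvRuns d 1 m with hT
  show (if S.map Prod.fst = T.map Prod.fst then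
          if pvInnerA (S.map Prod.snd) (T.map Prod.snd)
              (PySem.List.pyRange 0 (((S.map Prod.fst).length : Int)) 1) then acc + 1
          else acc
        else acc) = _
  by_cases h1 : S.map Prod.fst = T.map Prod.fst
  · rw [if_pos h1]
    have hok : pvOk S T = (S.zip T).all (fun x => pvRule x.1.2 x.2.2) := by
      unfold pvOk; simp [h1]
    have hlenc : (((S.map Prod.fst).length : Nat) : Int) = (((S.map Prod.snd).length : Nat) : Int) := by
      simp
    have hinner := pvInnerA_go (S.map Prod.snd) (T.map Prod.snd)
      (by simp [show S.length = T.length from by simpa using congrArg List.length h1])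
      (S.map Prod.snd).length 0 (by omega)
    simp only [Nat.cast_zero, List.drop_zero] at hinner
    have hzip : ((S.map Prod.snd).zip (T.map Prod.snd)).all (fun x => pvRule x.1 x.2)
        = (S.zip T).all (fun x => pvRule x.1.2 x.2.2) := by
      rw [List.zip_map, List.all_map]; congr 1
    rw [hok, hlenc, hinner, hzip]
  · rw [if_neg h1]
    have hok : pvOk S T = false := by unfold pvOk; simp [h1]
    rw [hok]
    simp

theorem pv_fold_eq (cs : List Char) :
    ∀ (ws : List String) (acc : Int), (∀ w ∈ ws, w ≠ "") →
    ws.foldl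
      (fun acc word =>
        let tp := pvEncA word.toList
        if (pvRunsOf cs).map Prod.fst = tp.1 then
          if pvInnerA ((pvRunsOf cs).map Prod.snd) tp.2
              (PySem.List.pyRange 0 ((((pvRunsOf cs).map Prod.fst).length : Int)) 1) then acc + 1
          else acc
        else acc)
      acc
    = acc + ((ws.filter (fun w => pvMatches cs w.toList)).length : Int) := by
  intro ws
  induction ws with
  | nil => intro acc _; simp
  | cons w ws ih =>
    intro acc hne
    have hw : w ≠ "" := hne w (by simp)
    have hwl : w.toList ≠ [] := by simpa [String.toList_eq_nil_iff] using hw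
    obtain ⟨d, m, hdm⟩ := List.exists_cons_of_ne_nil hwl
    simp only [List.foldl_cons]
    rw [hdm, pv_body_eq (pvRunsOf cs) d m acc, List.filter_cons]
    have hmeq : pvMatches cs w.toList = pvOk (pvRunsOf cs) (pvRuns d 1 m) := by
      rw [pvMatches_eq cs.length cs w.toList (le_refl _), hdm]
      rfl
    rw [hmeq]
    by_cases hok : pvOk (pvRunsOf cs) (pvRuns d 1 m) = true
    · rw [if_pos hok, if_pos hok, ih (acc + 1) (fun x hx => hne x (by simp [hx]))]
      simp only [List.length_cons]; push_cast; ring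
    · rw [if_neg hok, if_neg hok, ih acc (fun x hx => hne x (by simp [hx]))]

-- ===== VERDICT (by name: the statement is the Claim_ definition above) =====
theorem solution_497_2_1_spec : Claim_equal_solution_497_2_1 := by
  intro s words _ hpre
  obtain ⟨hs, hw⟩ := hpre
  have hsl : s.toList ≠ [] := by simpa [String.toList_eq_nil_iff] using hs
  obtain ⟨c, l, hcl⟩ := List.exists_cons_of_ne_nil hsl
  unfold Spec_solution_497_2_1 solution_497_2_1 solution_497_2_1_alt
  rw [hcl, pvEncA_eq]
  have hruns : pvRunsOf (c :: l) = pvRuns c 1 l := rfl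
  have := pv_fold_eq (c :: l) words 0 hw
  rw [hruns] at this
  simpa using this
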